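-- pv_equiv track=rewrite | github.com/4th-year-group-project/Terra-Infinity | real_rivers/river_network.py | compute_strahler_number
-- ===== SOURCE A (Python) =====
-- def compute_strahler_number(tree, node, strahler_numbers):
--     if node not in tree:
--         strahler_numbers[node] = 1
--         return 1
--
--     children = tree[node]
--     child_strahlers = [compute_strahler_number(tree, child, strahler_numbers) for child in children]
--     max_strahler = max(child_strahlers)
--     count_max = child_strahlers.count(max_strahler)
--
--     if count_max > 1:
--         strahler_numbers[node] = max_strahler + 1
--     else:
--         strahler_numbers[node] = max_strahler
--
--     if len(children) > 3:
--         strahler_numbers[node] += 1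
--
--     return strahler_numbers[node]
-- ===== SOURCE B (Python) =====
-- def compute_strahler_number(tree, node, strahler_numbers):
--     computed = set()
--     stack = [(node, False)]
--     while stack:
--         n, expanded = stack.pop()
--         if expanded:
--             children = tree[n]
--             vals = [strahler_numbers[c] for c in children]
--             m = max(vals)
--             s = m + 1 if vals.count(m) > 1 else m
--             if len(children) > 3:
--                 s += 1
--             strahler_numbers[n] = s
--             computed.add(n)
--         elif n in computed:
--             continue
--         elif n in tree:
--             stack.append((n, True))
--             for c in reversed(tree[n]):
--                 stack.append((c, False))
--         else:
--             strahler_numbers[n] = 1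
--             computed.add(n)
--     return strahler_numbers[node]
-- ===== Notes on version B (the rewrite author's own statement) =====
-- stated objective: alternative
-- what changed: Recursive depth-first Strahler computation replaced by an iterative explicit-stack post-order traversal with a memo set, so shared subtrees are evaluated once instead of once per occurrence; Pre_ excludes exactly the inputs where A raises (a reachable node with an empty child list gives ValueError from max([]), and a cycle reachable from node gives RecursionError).
import Mathlib
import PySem

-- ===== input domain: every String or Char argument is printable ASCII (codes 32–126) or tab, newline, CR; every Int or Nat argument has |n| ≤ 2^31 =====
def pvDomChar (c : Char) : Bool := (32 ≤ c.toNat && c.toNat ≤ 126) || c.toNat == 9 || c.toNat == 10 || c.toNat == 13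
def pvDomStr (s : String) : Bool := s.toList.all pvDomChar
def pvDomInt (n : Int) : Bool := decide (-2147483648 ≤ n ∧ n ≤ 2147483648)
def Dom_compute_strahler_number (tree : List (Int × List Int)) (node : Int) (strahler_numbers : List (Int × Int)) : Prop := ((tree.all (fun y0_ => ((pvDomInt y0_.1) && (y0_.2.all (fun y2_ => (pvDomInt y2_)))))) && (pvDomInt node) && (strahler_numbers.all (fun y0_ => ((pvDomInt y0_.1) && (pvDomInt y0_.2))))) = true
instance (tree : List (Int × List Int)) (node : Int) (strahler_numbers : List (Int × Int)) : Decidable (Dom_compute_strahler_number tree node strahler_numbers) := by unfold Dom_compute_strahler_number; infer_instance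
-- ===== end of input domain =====

-- B replaces A's recursion by an iterative explicit-stack post-order traversal with a memo set
-- (shared subtrees evaluated once). Both Pythons mutate strahler_numbers identically; the claim
-- proved here is about the RETURN value (the ports thread the dict as state).


-- ===== PORT A =====
-- A's recursion, with the mutated dict threaded as state; the Nat argument is a fuel guard
-- making the recursion total (unreachable under Pre_, where the Python recursion terminates).
def strahlerRecA (tree : List (Int × List Int)) : Nat → Int → PySem.Dict Int Int → Int × PySem.Dict Int Int
  | 0, _, d => (0, d)
  | fuel+1, node, d =>
    match (PySem.Dict.mk tree).get? node with
    | none => (1, d.insert node 1)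
    | some children =>
      -- child_strahlers = [compute_strahler_number(tree, child, strahler_numbers) for child in children]
      let r := children.foldl
        (fun (acc : List Int × PySem.Dict Int Int) c =>
          let rc := strahlerRecA tree fuel c acc.2
          (acc.1 ++ [rc.1], rc.2)) ([], d)
      match PySem.List.max? r.1 (fun y => y) with
      | none => (0, r.2)        -- max([]) raises ValueError in Python: outside Pre_
      | some max_strahler =>
        let v1 := if r.1.count max_strahler > 1 then max_strahler + 1 else max_strahler
        let v2 := if children.length > 3 then v1 + 1 else v1
        let d2 := r.2.insert node v2
        (d2.getD node 0, d2)    -- return strahler_numbers[node]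

def compute_strahler_number (tree : List (Int × List Int)) (node : Int) (strahler_numbers : List (Int × Int)) : Int :=
  (strahlerRecA tree (tree.length + 1) node (PySem.Dict.mk strahler_numbers)).1

-- ===== PORT B =====
-- B's while-loop over an explicit stack of (node, expanded) pairs with a memo set; the Nat
-- argument is a fuel guard making the loop total (sufficient under Pre_, proved below).
def loopB (tree : List (Int × List Int)) : Nat → List (Int × Bool) → PySem.Set Int → PySem.Dict Int Int → Option (PySem.Dict Int Int)
  | _, [], _, d => some d
  | 0, _ :: _, _, _ => none
  | fuel+1, (n, expanded) :: st, comp, d =>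
    if expanded then
      let children := ((PySem.Dict.mk tree).get? n).getD []
      let vals := children.map (fun c => d.getD c 0)
      match PySem.List.max? vals (fun y => y) with
      | none => none            -- max([]) raises ValueError in Python: outside Pre_
      | some m =>
        let s1 := if vals.count m > 1 then m + 1 else m
        let s2 := if children.length > 3 then s1 + 1 else s1
        loopB tree fuel st (PySem.Set.add comp n) (d.insert n s2)
    else if comp.contains n then
      loopB tree fuel st comp d
    else
      match (PySem.Dict.mk tree).get? n with
      | some children =>
        loopB tree fuel (children.reverse.foldl (fun st' c => (c, false) :: st') ((n, true) :: st)) comp d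
      | none =>
        loopB tree fuel st (PySem.Set.add comp n) (d.insert n 1)

def fuelB (tree : List (Int × List Int)) : Nat :=
  (tree.foldl (fun a p => max a p.2.length) 0 + 2) ^ (tree.length + 1)

def compute_strahler_number_alt (tree : List (Int × List Int)) (node : Int) (strahler_numbers : List (Int × Int)) : Int :=
  match loopB tree (fuelB tree) [(node, false)] PySem.Set.empty (PySem.Dict.mk strahler_numbers) with
  | some d => d.getD node 0     -- return strahler_numbers[node]
  | none => 0

-- ===== PRECONDITION & SPEC =====
-- doneSet tree i: the keys of tree whose whole subtree is acyclic of height ≤ i with every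
-- reachable key owning a nonempty child list — i.e. the keys on which the Python recursion
-- returns normally within height i.
def doneSet (tree : List (Int × List Int)) : Nat → List Int
  | 0 => []
  | i+1 => (tree.map Prod.fst).filter (fun k =>
      match (PySem.Dict.mk tree).get? k with
      | some cs => !cs.isEmpty && cs.all (fun c =>
          ((PySem.Dict.mk tree).get? c).isNone || (doneSet tree i).contains c)
      | none => false)

-- Pre_ holds exactly where Python A returns: node is no key of tree (A returns 1), or node's
-- subtree is well-founded with nonempty child lists throughout — otherwise A raises
-- ValueError (max of an empty child list) or RecursionError (a cycle).
def Pre_compute_strahler_number (tree : List (Int × List Int)) (node : Int) (strahler_numbers : List (Int × Int)) : Prop :=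
  ((PySem.Dict.mk tree).get? node).isNone = true ∨ node ∈ doneSet tree tree.length
instance (tree : List (Int × List Int)) (node : Int) (strahler_numbers : List (Int × Int)) : Decidable (Pre_compute_strahler_number tree node strahler_numbers) := by unfold Pre_compute_strahler_number; infer_instance

def pvWitness_compute_strahler_number : (List (Int × List Int)) × Int × (List (Int × Int)) := ([(0, [1, 2])], 0, [])

def Spec_compute_strahler_number (tree : List (Int × List Int)) (node : Int) (strahler_numbers : List (Int × Int)) (out : Int) : Prop := out = compute_strahler_number_alt tree node strahler_numbers
instance (tree : List (Int × List Int)) (node : Int) (strahler_numbers : List (Int × Int)) (out : Int) : Decidable (Spec_compute_strahler_number tree node strahler_numbers out) := by unfold Spec_compute_strahler_number; infer_instance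

-- ===== CLAIM (what is proved, stated in full; the proofs are below) =====
def Claim_equal_compute_strahler_number : Prop := ∀ (tree : List (Int × List Int)) (node : Int) (strahler_numbers : List (Int × Int)), Dom_compute_strahler_number tree node strahler_numbers → Pre_compute_strahler_number tree node strahler_numbers → Spec_compute_strahler_number tree node strahler_numbers (compute_strahler_number tree node strahler_numbers)

-- ===== LEMMAS AND PROOFS =====

-- The pure Strahler value (no dict state), fueled like strahlerRecA.
def valF (tree : List (Int × List Int)) : Nat → Int → Int
  | 0, _ => 0
  | fuel+1, n =>
    match (PySem.Dict.mk tree).get? n with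
    | none => 1
    | some cs =>
      let vs := cs.map (valF tree fuel)
      match PySem.List.max? vs (fun y => y) with
      | none => 0
      | some m =>
        let v1 := if vs.count m > 1 then m + 1 else m
        if cs.length > 3 then v1 + 1 else v1

-- n is resolved at height i
def doneish (tree : List (Int × List Int)) (i : Nat) (n : Int) : Prop :=
  ((PySem.Dict.mk tree).get? n).isNone = true ∨ n ∈ doneSet tree i

def cval (tree : List (Int × List Int)) (n : Int) : Int := valF tree (tree.length + 1) n

theorem foldA_spec (tree : List (Int × List Int)) (fuel : Nat)
    (IH : ∀ n d, (strahlerRecA tree fuel n d).1 = valF tree fuel n) :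
    ∀ (cs : List Int) (acc : List Int) (d : PySem.Dict Int Int),
      (cs.foldl (fun (acc : List Int × PySem.Dict Int Int) c =>
          let rc := strahlerRecA tree fuel c acc.2
          (acc.1 ++ [rc.1], rc.2)) (acc, d)).1 = acc ++ cs.map (valF tree fuel) := by
  intro cs
  induction cs with
  | nil => intro acc d; simp
  | cons c cs ih =>
    intro acc d
    simp only [List.foldl_cons, List.map_cons]
    rw [ih]
    simp [IH]

theorem strahlerRecA_fst (tree : List (Int × List Int)) :
    ∀ fuel n d, (strahlerRecA tree fuel n d).1 = valF tree fuel n := by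
  intro fuel
  induction fuel with
  | zero => intro n d; rfl
  | succ fuel IH =>
    intro n d
    simp only [strahlerRecA, valF]
    cases h : (PySem.Dict.mk tree).get? n with
    | none => rfl
    | some cs =>
      simp only []
      rw [foldA_spec tree fuel IH cs [] d]
      simp only [List.nil_append]
      cases hm : PySem.List.max? (cs.map (valF tree fuel)) (fun y => y) with
      | none => rfl
      | some m =>
        simp only [PySem.Dict.getD_insert_self]
        rfl

theorem doneSet_succ_elim (tree : List (Int × List Int)) (i : Nat) (n : Int)
    (hn : n ∈ doneSet tree (i+1)) :
    ∃ cs, (PySem.Dict.mk tree).get? n = some cs ∧ cs ≠ [] ∧ ∀ c ∈ cs, doneish tree i c := by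
  simp only [doneSet, List.mem_filter] at hn
  obtain ⟨-, hc⟩ := hn
  cases hg : (PySem.Dict.mk tree).get? n with
  | none => rw [hg] at hc; simp at hc
  | some cs =>
    rw [hg] at hc
    simp only [Bool.and_eq_true, List.all_eq_true, Bool.or_eq_true] at hc
    refine ⟨cs, rfl, ?_, ?_⟩
    · intro h; subst h; simp at hc
    · intro c hcmem
      rcases (hc.2 c hcmem) with h | h
      · exact Or.inl (by simpa using h)
      · exact Or.inr (by simpa using h)

theorem valF_stable (tree : List (Int × List Int)) :
    ∀ i n, doneish tree i n → ∀ f, i + 1 ≤ f → valF tree f n = valF tree (i + 1) n := by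
  intro i
  induction i with
  | zero =>
    intro n hn f hf
    have hg : (PySem.Dict.mk tree).get? n = none := by
      rcases hn with h | h
      · exact Option.isNone_iff_eq_none.mp h
      · simp [doneSet] at h
    obtain ⟨f', rfl⟩ : ∃ f', f = f' + 1 := ⟨f - 1, by omega⟩
    simp only [valF, hg]
  | succ i ih =>
    intro n hn f hf
    obtain ⟨f', rfl⟩ : ∃ f', f = f' + 1 := ⟨f - 1, by omega⟩
    cases hg : (PySem.Dict.mk tree).get? n with
    | none => simp only [valF, hg]
    | some cs =>
      rcases hn with h | h
      · rw [hg] at h; simp at h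
      · obtain ⟨cs', hg', -, hcs⟩ := doneSet_succ_elim tree i n h
        rw [hg] at hg'; cases hg'
        have hmap : cs.map (valF tree f') = cs.map (valF tree (i+1)) := by
          apply List.map_congr_left
          intro c hc
          rw [ih c (hcs c hc) f' (by omega), ih c (hcs c hc) (i+1) (by omega)]
        simp only [valF, hg, hmap]
        rfl

theorem cval_leaf (tree : List (Int × List Int)) (n : Int)
    (hg : (PySem.Dict.mk tree).get? n = none) : cval tree n = 1 := by
  simp only [cval, valF, hg]

theorem cval_succ (tree : List (Int × List Int)) (i : Nat) (hi : i + 1 ≤ tree.length)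
    (n : Int) (cs : List Int) (hg : (PySem.Dict.mk tree).get? n = some cs)
    (hn : n ∈ doneSet tree (i+1)) :
    cval tree n =
      (match PySem.List.max? (cs.map (cval tree)) (fun y => y) with
       | none => 0
       | some m =>
         let v1 := if (cs.map (cval tree)).count m > 1 then m + 1 else m
         if cs.length > 3 then v1 + 1 else v1) := by
  obtain ⟨cs', hg', -, hcs⟩ := doneSet_succ_elim tree i n hn
  rw [hg] at hg'; cases hg'
  have h1 : cval tree n = valF tree (i+1+1) n :=
    valF_stable tree (i+1) n (Or.inr hn) (tree.length + 1) (by omega)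
  have hmap : cs.map (valF tree (i+1)) = cs.map (cval tree) := by
    apply List.map_congr_left
    intro c hc
    exact (valF_stable tree i c (hcs c hc) (tree.length + 1) (by omega)).symm
  rw [h1, ← hmap]
  simp only [valF, hg]

-- push of reversed children

theorem revpush (cs : List Int) (t : List (Int × Bool)) :
    cs.reverse.foldl (fun st' c => (c, false) :: st') t = cs.map (fun c => (c, false)) ++ t := by
  induction cs generalizing t with
  | nil => rfl
  | cons c cs ih =>
    simp only [List.reverse_cons, List.foldl_append, List.foldl_cons, List.foldl_nil,
      List.map_cons, List.cons_append]
    rw [ih]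

theorem le_foldl_maxlen_init : ∀ (l : List (Int × List Int)) (a : Nat),
    a ≤ l.foldl (fun a q => max a q.2.length) a := by
  intro l
  induction l with
  | nil => intro a; simp
  | cons p l ih =>
    intro a
    simp only [List.foldl_cons]
    exact le_trans (le_max_left _ _) (ih _)

theorem len_le_foldl_maxlen : ∀ (l : List (Int × List Int)) (a : Nat) (p : Int × List Int),
    p ∈ l → p.2.length ≤ l.foldl (fun a q => max a q.2.length) a := by
  intro l
  induction l with
  | nil => intro a p h; simp at h
  | cons q l ih =>
    intro a p h
    rcases List.mem_cons.mp h with rfl | h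
    · simp only [List.foldl_cons]
      exact le_trans (le_max_right _ _) (le_foldl_maxlen_init _ _)
    · exact ih _ p h

theorem run_skip (tree : List (Int × List Int)) (n : Int) (comp : PySem.Set Int)
    (d : PySem.Dict Int Int) (hc : PySem.Set.contains comp n = true) (rest : List (Int × Bool)) :
    ∀ f, loopB tree (1 + f) ((n, false) :: rest) comp d = loopB tree f rest comp d := by
  intro f
  rw [Nat.add_comm 1 f]
  simp only [loopB, hc]
  simp

theorem run_leaf (tree : List (Int × List Int)) (n : Int) (comp : PySem.Set Int)
    (d : PySem.Dict Int Int) (hc : PySem.Set.contains comp n = false)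
    (hg : (PySem.Dict.mk tree).get? n = none) (rest : List (Int × Bool)) :
    ∀ f, loopB tree (1 + f) ((n, false) :: rest) comp d
      = loopB tree f rest (PySem.Set.add comp n) (d.insert n 1) := by
  intro f
  rw [Nat.add_comm 1 f]
  simp only [loopB, hc, hg]
  simp

theorem leaf_pack (tree : List (Int × List Int)) (n : Int) (comp : PySem.Set Int)
    (d : PySem.Dict Int Int) (hInv : ∀ m ∈ comp, d.get? m = some (cval tree m))
    (hg : (PySem.Dict.mk tree).get? n = none) :
    (∀ m ∈ PySem.Set.add comp n, (d.insert n 1).get? m = some (cval tree m)) ∧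
    (∀ m, (d.insert n 1).get? m = d.get? m ∨ (d.insert n 1).get? m = some (cval tree m)) ∧
    (d.insert n 1).get? n = some (cval tree n) := by
  have hcv : cval tree n = 1 := cval_leaf tree n hg
  refine ⟨?_, ?_, ?_⟩
  · intro m hm
    rw [PySem.Dict.get?_insert]
    by_cases hmn : m = n
    · simp [hmn, hcv]
    · simp only [if_neg hmn]
      rcases (PySem.Set.mem_add comp n m).mp hm with h | h
      · exact hInv m h
      · exact absurd h hmn
  · intro m
    rw [PySem.Dict.get?_insert]
    by_cases hmn : m = n
    · right; simp [hmn, hcv]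
    · left; simp [hmn]
  · simp [PySem.Dict.get?_insert_self, hcv]

theorem loopB_run (tree : List (Int × List Int)) :
    ∀ i, i ≤ tree.length → ∀ n, doneish tree i n →
    ∀ (comp : PySem.Set Int) (d : PySem.Dict Int Int), (∀ m ∈ comp, d.get? m = some (cval tree m)) →
    ∀ rest, ∃ k comp' d',
      k ≤ (tree.foldl (fun a p => max a p.2.length) 0 + 2) ^ (i + 1) ∧
      (∀ m ∈ comp', d'.get? m = some (cval tree m)) ∧
      (∀ m, d'.get? m = d.get? m ∨ d'.get? m = some (cval tree m)) ∧
      d'.get? n = some (cval tree n) ∧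
      ∀ f, loopB tree (k + f) ((n, false) :: rest) comp d = loopB tree f rest comp' d' := by
  intro i
  induction i with
  | zero =>
    intro hi n hn comp d hInv rest
    have hg : (PySem.Dict.mk tree).get? n = none := by
      rcases hn with h | h
      · exact Option.isNone_iff_eq_none.mp h
      · simp [doneSet] at h
    by_cases hc : PySem.Set.contains comp n = true
    · have hdn : d.get? n = some (cval tree n) :=
        hInv n ((PySem.Set.contains_iff comp n).mp hc)
      exact ⟨1, comp, d, Nat.one_le_pow _ _ (by omega), hInv, fun m => Or.inl rfl, hdn,
        run_skip tree n comp d hc rest⟩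
    · have hc' : PySem.Set.contains comp n = false := by simpa using hc
      obtain ⟨h1, h2, h3⟩ := leaf_pack tree n comp d hInv hg
      exact ⟨1, PySem.Set.add comp n, d.insert n 1, Nat.one_le_pow _ _ (by omega), h1, h2, h3,
        run_leaf tree n comp d hc' hg rest⟩
  | succ i ih =>
    intro hi n hn comp d hInv rest
    by_cases hc : PySem.Set.contains comp n = true
    · have hdn : d.get? n = some (cval tree n) :=
        hInv n ((PySem.Set.contains_iff comp n).mp hc)
      exact ⟨1, comp, d, Nat.one_le_pow _ _ (by omega), hInv, fun m => Or.inl rfl, hdn,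
        run_skip tree n comp d hc rest⟩
    · have hc' : PySem.Set.contains comp n = false := by simpa using hc
      cases hiso : (PySem.Dict.mk tree).get? n with
      | none =>
        obtain ⟨h1, h2, h3⟩ := leaf_pack tree n comp d hInv hiso
        exact ⟨1, PySem.Set.add comp n, d.insert n 1, Nat.one_le_pow _ _ (by omega), h1, h2, h3,
          run_leaf tree n comp d hc' hiso rest⟩
      | some cs =>
        have hn' : n ∈ doneSet tree (i+1) := by
          rcases hn with h | h
          · rw [hiso] at h; simp at h
          · exact h
        obtain ⟨cs', hg', hne, hcs⟩ := doneSet_succ_elim tree i n hn'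
        rw [hiso] at hg'
        obtain rfl : cs = cs' := (Option.some.inj hg').symm ▸ rfl
        have chil : ∀ (cs2 : List Int), (∀ c ∈ cs2, doneish tree i c) →
            ∀ (comp0 : PySem.Set Int) (d0 : PySem.Dict Int Int),
            (∀ m ∈ comp0, d0.get? m = some (cval tree m)) →
            ∀ (rest0 : List (Int × Bool)), ∃ k comp1 d1,
              k ≤ cs2.length * (tree.foldl (fun a p => max a p.2.length) 0 + 2) ^ (i + 1) ∧
              (∀ m ∈ comp1, d1.get? m = some (cval tree m)) ∧
              (∀ m, d1.get? m = d0.get? m ∨ d1.get? m = some (cval tree m)) ∧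
              (∀ c ∈ cs2, d1.get? c = some (cval tree c)) ∧
              ∀ f, loopB tree (k + f) (cs2.map (fun c => (c, false)) ++ rest0) comp0 d0
                    = loopB tree f rest0 comp1 d1 := by
          intro cs2
          induction cs2 with
          | nil =>
            intro _ comp0 d0 hInv0 rest0
            refine ⟨0, comp0, d0, by simp, hInv0, fun m => Or.inl rfl, by simp, fun f => ?_⟩
            rw [Nat.zero_add, List.map_nil, List.nil_append]
          | cons c cs2 ihc =>
            intro hall comp0 d0 hInv0 rest0
            obtain ⟨kc, compc, dc, hkc, hInvc, hPc, hdnc, hfc⟩ :=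
              ih (by omega) c (hall c (by simp)) comp0 d0 hInv0 (cs2.map (fun c => (c, false)) ++ rest0)
            obtain ⟨k', comp1, d1, hk', hInv1, hP1, hget1, hf1⟩ :=
              ihc (fun x hx => hall x (by simp [hx])) compc dc hInvc rest0
            refine ⟨kc + k', comp1, d1, ?_, hInv1, ?_, ?_, ?_⟩
            · simp only [List.length_cons, Nat.succ_mul]; omega
            · intro m
              rcases hP1 m with h | h
              · rw [h]; exact hPc m
              · exact Or.inr h
            · intro x hx
              rcases List.mem_cons.mp hx with rfl | hx2
              · rcases hP1 x with h | h
                · rw [h]; exact hdnc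
                · exact h
              · exact hget1 x hx2
            · intro f
              have e0 : kc + k' + f = kc + (k' + f) := by omega
              rw [e0, List.map_cons, List.cons_append, hfc (k' + f), hf1 f]
        obtain ⟨kc, comp1, d1, hkc, hInv1, hP1, hget1, hfc⟩ := chil cs hcs comp d hInv ((n, true) :: rest)
        have hvals : cs.map (fun c => d1.getD c 0) = cs.map (cval tree) := by
          apply List.map_congr_left; intro c hcm
          rw [PySem.Dict.getD_of_get?_eq_some d1 0 (hget1 c hcm)]
        have hmax : ∃ mx, PySem.List.max? (cs.map (cval tree)) (fun y => y) = some mx := by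
          cases hm : PySem.List.max? (cs.map (cval tree)) (fun y => y) with
          | none =>
            rw [PySem.List.max?_eq_none_iff] at hm
            exact absurd (List.map_eq_nil_iff.mp hm) hne
          | some mx => exact ⟨mx, rfl⟩
        obtain ⟨mx, hmx⟩ := hmax
        have hcv := cval_succ tree i hi n cs hiso hn'
        rw [hmx] at hcv
        have hvn : cval tree n =
            (if cs.length > 3 then (if (cs.map (cval tree)).count mx > 1 then mx + 1 else mx) + 1
             else if (cs.map (cval tree)).count mx > 1 then mx + 1 else mx) := hcv
        refine ⟨kc + 2, PySem.Set.add comp1 n, d1.insert n (cval tree n), ?_, ?_, ?_, ?_, ?_⟩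
        · have hmem : (n, cs) ∈ tree := by
            have := PySem.Dict.mem_items_of_get?_eq_some _ hiso
            simpa using this
          have hlen : cs.length ≤ tree.foldl (fun a p => max a p.2.length) 0 :=
            len_le_foldl_maxlen tree 0 (n, cs) hmem
          have hpow : 1 ≤ (tree.foldl (fun a p => max a p.2.length) 0 + 2) ^ (i + 1) :=
            Nat.one_le_pow _ _ (by omega)
          have hps : (tree.foldl (fun a p => max a p.2.length) 0 + 2) ^ (i + 1 + 1)
              = (tree.foldl (fun a p => max a p.2.length) 0 + 2) ^ (i + 1)
                * (tree.foldl (fun a p => max a p.2.length) 0 + 2) := pow_succ _ _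
          nlinarith [hkc, hlen, hpow]
        · intro m hm
          rw [PySem.Dict.get?_insert]
          by_cases hmn : m = n
          · simp [hmn]
          · simp only [if_neg hmn]
            rcases (PySem.Set.mem_add comp1 n m).mp hm with h | h
            · exact hInv1 m h
            · exact absurd h hmn
        · intro m
          rw [PySem.Dict.get?_insert]
          by_cases hmn : m = n
          · right; simp [hmn]
          · simp only [if_neg hmn]; exact hP1 m
        · simp [PySem.Dict.get?_insert_self]
        · intro f
          have e0 : kc + 2 + f = (kc + (1 + f)) + 1 := by omega
          rw [e0]
          simp only [loopB, hc', hiso]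
          simp only [Bool.false_eq_true, if_false]
          rw [revpush, hfc (1 + f), Nat.add_comm 1 f]
          simp only [loopB, hiso, Option.getD_some, hvals, hmx]
          rw [← hvn]
          simp

theorem loopB_nil (tree : List (Int × List Int)) :
    ∀ (f : Nat) (comp : PySem.Set Int) (d : PySem.Dict Int Int), loopB tree f [] comp d = some d := by
  intro f comp d
  cases f <;> rfl

-- ===== VERDICT (by name: the statement is the Claim_ definition above) =====
theorem compute_strahler_number_spec : Claim_equal_compute_strahler_number := by
  intro tree node s hdom hpre
  unfold Spec_compute_strahler_number
  have hdone : doneish tree tree.length node := hpre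
  obtain ⟨k, comp', d', hk, hInv', hP', hdn, hf⟩ :=
    loopB_run tree tree.length le_rfl node hdone [] (PySem.Dict.mk s) (by intro m hm; simp at hm) []
  have hkB : k ≤ fuelB tree := hk
  have hrun : loopB tree (fuelB tree) [(node, false)] [] (PySem.Dict.mk s) = some d' := by
    have h1 := hf (fuelB tree - k)
    rw [Nat.add_sub_cancel' hkB, loopB_nil] at h1
    exact h1
  have hB : compute_strahler_number_alt tree node s = cval tree node := by
    unfold compute_strahler_number_alt
    rw [show PySem.Set.empty = ([] : PySem.Set Int) from rfl, hrun]
    exact PySem.Dict.getD_of_get?_eq_some d' 0 hdn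
  have hA : compute_strahler_number tree node s = cval tree node := by
    unfold compute_strahler_number
    rw [strahlerRecA_fst]
    rfl
  rw [hA, hB]
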